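-- pv_equiv track=rewrite | github.com/zhang1career/service-foundation | common/utils/string_util.py | downcase_only_if_first_char_is_uppercase
-- ===== SOURCE A (Python) =====
-- def downcase_only_if_first_char_is_uppercase(input_str: str):
--     """
--     Convert the first character of a string to lowercase only if it is uppercase
--     All characters uppercase will be ignored
--     'Abc' -> 'abc'
--     'def' -> 'def'
--     'XYZ' -> 'XYZ'
--     'p'   -> 'p'
--     'Q'   -> 'Q'
--     ''    -> None
--
--     @param input_str:
--     @return: (output_str, is_all_uppercase)
--     """
--     if not input_str:
--         return None, None
--
--     if len(input_str) <= 1: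
--         return input_str, input_str.isupper()
--
--     uppercase_index_sum = 0
--     for i in range(0, len(input_str)):
--         char = input_str[i]
--         if char.isupper():
--             uppercase_index_sum += (i + 1)
--
--     if uppercase_index_sum == 1:
--         return input_str[0].lower() + input_str[1:], False
--     return input_str, uppercase_index_sum >= (1 + len(input_str)) * len(input_str) / 2
-- ===== SOURCE B (Python) =====
-- def downcase_only_if_first_char_is_uppercase(input_str: str):
--     if not input_str:
--         return None, None
--     if len(input_str) == 1:
--         return input_str, input_str.isupper()
--     head, rest = input_str[0], input_str[1:]
--     if head.isupper() and not any(c.isupper() for c in rest):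
--         return head.lower() + rest, False
--     return input_str, head.isupper() and all(c.isupper() for c in rest)
-- ===== Notes on version B (the rewrite author's own statement) =====
-- stated objective: simpler
-- what changed: Replaces A's weighted-index-sum trick (sum of i+1 over uppercase positions, compared against 1 and against the triangular number) with direct predicate checks: first char uppercase, any uppercase in the rest, all uppercase in the rest.
import Mathlib
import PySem

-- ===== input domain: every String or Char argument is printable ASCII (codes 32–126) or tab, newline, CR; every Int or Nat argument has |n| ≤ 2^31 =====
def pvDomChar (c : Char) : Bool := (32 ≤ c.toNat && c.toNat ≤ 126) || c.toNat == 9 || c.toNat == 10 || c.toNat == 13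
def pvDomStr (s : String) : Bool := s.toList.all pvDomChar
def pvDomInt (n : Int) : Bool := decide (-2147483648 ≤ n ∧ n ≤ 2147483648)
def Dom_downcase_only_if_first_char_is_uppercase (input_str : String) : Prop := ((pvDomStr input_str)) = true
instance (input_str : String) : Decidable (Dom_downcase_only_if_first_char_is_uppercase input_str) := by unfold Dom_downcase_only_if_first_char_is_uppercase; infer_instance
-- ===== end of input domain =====

-- B replaces A's weighted-index-sum arithmetic trick by direct predicate checks (first char upper / rest has upper / all upper): objective 'simpler'.

-- ===== PORT A =====
-- A's weighted sum: for i in range(len(s)): if s[i].isupper(): sum += i+1  — a foldl over enumerate(s).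
-- Python's (1+n)*n/2 is a float; since (1+n)*n is always even, the comparison 'sum >= (1+n)*n/2'
-- is exactly the integer comparison 'sum >= ((1+n)*n) // 2' ported here (exact: no rounding occurs).
-- For a single ASCII character, str.isupper() equals the per-char isupper (exact on the ASCII domain).
def downcase_only_if_first_char_is_uppercase (input_str : String) : Option String × Option Bool :=
  match input_str.toList with
  | [] => (none, none)
  | c :: rest =>
    if (c :: rest).length ≤ 1 then
      (some input_str, some (PySem.Chars.isupper c))
    else
      if (PySem.List.enumerate (c :: rest)).foldl
          (fun acc p => if PySem.Chars.isupper p.2 then acc + (p.1 + 1) else acc) 0 = 1 then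
        (some (String.ofList (PySem.Chars.lowerChar c :: rest)), some false)
      else
        (some input_str,
         some (decide ((PySem.List.enumerate (c :: rest)).foldl
            (fun acc p => if PySem.Chars.isupper p.2 then acc + (p.1 + 1) else acc) 0
            ≥ PySem.Int.floordiv ((1 + ((c :: rest).length : Int)) * ((c :: rest).length : Int)) 2)))

-- ===== PORT B =====
def downcase_only_if_first_char_is_uppercase_alt (input_str : String) : Option String × Option Bool :=
  match input_str.toList with
  | [] => (none, none)
  | [c] => (some input_str, some (PySem.Chars.isupper c))
  | c :: rest =>
    if PySem.Chars.isupper c && rest.all (fun d => !PySem.Chars.isupper d) then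
      (some (String.ofList (PySem.Chars.lowerChar c :: rest)), some false)
    else
      (some input_str, some (PySem.Chars.isupper c && rest.all (fun d => PySem.Chars.isupper d)))

-- ===== PRECONDITION & SPEC =====
def Spec_downcase_only_if_first_char_is_uppercase (input_str : String) (out : Option String × Option Bool) : Prop := out = downcase_only_if_first_char_is_uppercase_alt input_str
instance (input_str : String) (out : Option String × Option Bool) : Decidable (Spec_downcase_only_if_first_char_is_uppercase input_str out) := by unfold Spec_downcase_only_if_first_char_is_uppercase; infer_instance

-- ===== CLAIM (what is proved, stated in full; the proofs are below) =====
def Claim_equal_downcase_only_if_first_char_is_uppercase : Prop := ∀ (input_str : String), Dom_downcase_only_if_first_char_is_uppercase input_str → Spec_downcase_only_if_first_char_is_uppercase input_str (downcase_only_if_first_char_is_uppercase input_str)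

-- ===== LEMMAS AND PROOFS =====

-- The weighted sum of A, in recursive form: wsum cs k = sum of (k+1+i) over upper positions i of cs.
def wsum : List Char → Int → Int
  | [], _ => 0
  | c :: cs, k => (if PySem.Chars.isupper c then k + 1 else 0) + wsum cs (k + 1)

-- The triangle bound: tri cs k = sum of (k+1+i) over ALL positions i of cs.
def tri : List Char → Int → Int
  | [], _ => 0
  | _ :: cs, k => (k + 1) + tri cs (k + 1)

theorem wsum_cons (c : Char) (cs : List Char) (k : Int) :
    wsum (c :: cs) k = (if PySem.Chars.isupper c then k + 1 else 0) + wsum cs (k + 1) := rfl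

theorem tri_cons (c : Char) (cs : List Char) (k : Int) :
    tri (c :: cs) k = (k + 1) + tri cs (k + 1) := rfl

theorem foldl_enumerate_eq_wsum (cs : List Char) : ∀ (k acc : Int),
    (PySem.List.enumerate cs k).foldl
      (fun acc p => if PySem.Chars.isupper p.2 then acc + (p.1 + 1) else acc) acc
    = acc + wsum cs k := by
  induction cs with
  | nil => intro k acc; simp [PySem.List.enumerate, wsum]
  | cons c cs ih =>
    intro k acc
    rw [PySem.List.enumerate_cons, List.foldl_cons, wsum_cons, ih]
    by_cases h : PySem.Chars.isupper c
    · simp [h]; ring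
    · simp [h]

theorem wsum_nonneg (cs : List Char) : ∀ k : Int, 0 ≤ k → 0 ≤ wsum cs k := by
  induction cs with
  | nil => intro k _; simp [wsum]
  | cons c cs ih =>
    intro k hk
    have := ih (k + 1) (by omega)
    rw [wsum_cons]; split <;> omega

theorem wsum_eq_zero_iff (cs : List Char) : ∀ k : Int, 0 ≤ k →
    (wsum cs k = 0 ↔ cs.all (fun d => !PySem.Chars.isupper d) = true) := by
  induction cs with
  | nil => intro k _; simp [wsum]
  | cons c cs ih =>
    intro k hk
    have h1 := wsum_nonneg cs (k + 1) (by omega)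
    have h2 := ih (k + 1) (by omega)
    rw [wsum_cons, List.all_cons]
    by_cases h : PySem.Chars.isupper c
    · simp only [h, if_true, Bool.not_true, Bool.false_and]
      constructor
      · intro h0; omega
      · intro h0; simp at h0
    · simp only [h, Bool.not_false, Bool.true_and]
      simpa using h2

theorem wsum_ne_zero_ge (cs : List Char) : ∀ k : Int, 0 ≤ k → wsum cs k ≠ 0 →
    k + 1 ≤ wsum cs k := by
  induction cs with
  | nil => intro k _ h; simp [wsum] at h
  | cons c cs ih =>
    intro k hk hne
    have h0 := wsum_nonneg cs (k + 1) (by omega)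
    rw [wsum_cons] at hne ⊢
    by_cases h : PySem.Chars.isupper c
    · simp only [h, if_true] at *; omega
    · simp [h] at hne ⊢
      have := ih (k + 1) (by omega) hne
      omega

theorem wsum_le_tri (cs : List Char) : ∀ k : Int, 0 ≤ k → wsum cs k ≤ tri cs k := by
  induction cs with
  | nil => intro k _; simp [wsum, tri]
  | cons c cs ih =>
    intro k hk
    have := ih (k + 1) (by omega)
    rw [wsum_cons, tri_cons]; split <;> omega

theorem wsum_eq_tri_iff (cs : List Char) : ∀ k : Int, 0 ≤ k →
    (tri cs k ≤ wsum cs k ↔ cs.all (fun d => PySem.Chars.isupper d) = true) := by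
  induction cs with
  | nil => intro k _; simp [wsum, tri]
  | cons c cs ih =>
    intro k hk
    have h1 := wsum_le_tri cs (k + 1) (by omega)
    have h2 := ih (k + 1) (by omega)
    rw [wsum_cons, tri_cons, List.all_cons]
    by_cases h : PySem.Chars.isupper c
    · simp only [h, if_true, Bool.true_and]
      constructor
      · intro h0; exact h2.mp (by omega)
      · intro h0; have := h2.mpr h0; omega
    · simp only [h, Bool.false_and]
      constructor
      · intro h0; simp at h0; omega
      · intro h0; simp at h0

theorem tri_double (cs : List Char) : ∀ k : Int,
    2 * tri cs k = (cs.length : Int) * ((cs.length : Int) + 2 * k + 1) := by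
  induction cs with
  | nil => intro k; simp [tri]
  | cons c cs ih =>
    intro k
    rw [tri_cons]
    have := ih (k + 1)
    simp only [List.length_cons]
    push_cast
    linear_combination this

theorem tri_eq_floordiv (cs : List Char) :
    PySem.Int.floordiv ((1 + (cs.length : Int)) * (cs.length : Int)) 2 = tri cs 0 := by
  have h := tri_double cs 0
  have h2 : (1 + (cs.length : Int)) * (cs.length : Int) = tri cs 0 * 2 := by linear_combination -h
  rw [h2, PySem.Int.floordiv_eq_ediv_of_pos (by omega)]
  exact Int.mul_ediv_cancel _ (by omega)

-- ===== VERDICT (by name: the statement is the Claim_ definition above) =====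
theorem downcase_only_if_first_char_is_uppercase_spec : Claim_equal_downcase_only_if_first_char_is_uppercase := by
  intro input_str _
  unfold Spec_downcase_only_if_first_char_is_uppercase
  unfold downcase_only_if_first_char_is_uppercase downcase_only_if_first_char_is_uppercase_alt
  match h : input_str.toList with
  | [] => rfl
  | [c] => simp
  | c :: d :: rs =>
    dsimp only []
    rw [if_neg (by simp : ¬ ((c :: d :: rs).length ≤ 1))]
    rw [foldl_enumerate_eq_wsum]
    simp only [zero_add]
    rw [tri_eq_floordiv (c :: d :: rs)]
    have hz := wsum_eq_zero_iff (d :: rs) 1 (by omega)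
    have hnn := wsum_nonneg (d :: rs) 1 (by omega)
    have hge := wsum_ne_zero_ge (d :: rs) 1 (by omega)
    have htri := wsum_eq_tri_iff (c :: d :: rs) 0 (by omega)
    by_cases hc : PySem.Chars.isupper c
    · by_cases hr : (d :: rs).all (fun x => !PySem.Chars.isupper x) = true
      · have h0 := hz.mpr hr
        have hW : wsum (c :: d :: rs) 0 = 1 := by
          rw [wsum_cons]; simp only [hc, if_true, zero_add]; omega
        rw [if_pos hW, if_pos (by simp [hc, hr])]
      · have hw2 : 2 ≤ wsum (d :: rs) 1 := hge (fun h0 => hr (hz.mp h0))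
        have hW : wsum (c :: d :: rs) 0 = 1 + wsum (d :: rs) 1 := by
          rw [wsum_cons]; simp [hc]
        rw [if_neg (by omega), if_neg (by simp [hc, hr])]
        refine congrArg _ (congrArg _ ?_)
        rcases hb : (d :: rs).all (fun x => PySem.Chars.isupper x) with _ | _
        · have hna : ¬ ((c :: d :: rs).all (fun x => PySem.Chars.isupper x) = true) := by
            simp only [List.all_cons] at hb ⊢
            simp [hb]
          have hlt : ¬ (tri (c :: d :: rs) 0 ≤ wsum (c :: d :: rs) 0) := fun hle => hna (htri.mp hle)
          simp [hc, hlt]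
        · have hall : (c :: d :: rs).all (fun x => PySem.Chars.isupper x) = true := by
            simp only [List.all_cons] at hb ⊢
            simp [hb, hc]
          have hle : tri (c :: d :: rs) 0 ≤ wsum (c :: d :: rs) 0 := htri.mpr hall
          simp [hc, hle]
    · have hW : wsum (c :: d :: rs) 0 = wsum (d :: rs) 1 := by
        rw [wsum_cons]; simp [hc]
      have hne : wsum (c :: d :: rs) 0 ≠ 1 := by
        by_cases h0 : wsum (d :: rs) 1 = 0
        · omega
        · have := hge h0; omega
      have hnall : ¬ ((c :: d :: rs).all (fun x => PySem.Chars.isupper x) = true) := by simp [hc]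
      have hlt : ¬ (tri (c :: d :: rs) 0 ≤ wsum (c :: d :: rs) 0) := fun hle => hnall (htri.mp hle)
      rw [if_neg hne, if_neg (by simp [hc])]
      simp [hc, hlt]
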